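-- pv_equiv track=rewrite | github.com/mvratnam10/ISO15022TestMessageGenarator | ApplyConfigToTemplates.py | get_next_refrance
-- ===== SOURCE A (Python) =====
-- def get_next_refrance(inputref):
--     length = len(inputref)
--     # Input  = upper(Input)
--     output = ''
--     nextcharchangerequired = True
--     while nextcharchangerequired and length > 0:
--         length -= 1
--         currentchar = inputref[length:length + 1]
--         if currentchar == '9':
--             nextcharchangerequired = True
--             output = output + getnextchar(currentchar)
--         else:
--             output = inputref[0:length] + getnextchar(currentchar) + output
--             length = 0
--     return output
--
-- def getnextchar(onechar):
--     # OneChar = upper(OneChar)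
--     alphanumstrupple = ('A', 'B', 'C', 'D', 'E', 'F', 'G',
--                         'H', 'I', 'J', 'K', 'L', 'M', 'N', 'O', 'P',
--                         'Q', 'R', 'S', 'T', 'U', 'V', 'W', 'X', 'Y',
--                         'Z', '0', '1', '2', '3', '4', '5', '6', '7',
--                         '8', '9')
--
--     if onechar == '9':
--         return 'A'
--
--     location = 0
--     for X in alphanumstrupple:
--         location += 1
--         if X == onechar:
--             return alphanumstrupple[location]
--     return 'A'
-- ===== SOURCE B (Python) =====
-- def get_next_refrance(inputref):
--     stripped = inputref.rstrip('9')
--     k = len(inputref) - len(stripped)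
--     if not stripped:
--         return 'A' * k
--     c = stripped[-1]
--     if 'A' <= c <= 'Y' or '0' <= c <= '8':
--         nxt = chr(ord(c) + 1)
--     elif c == 'Z':
--         nxt = '0'
--     else:
--         nxt = 'A'
--     return stripped[:-1] + nxt + 'A' * k
-- ===== Notes on version B (the rewrite author's own statement) =====
-- stated objective: simpler
-- what changed: Replaced A's right-to-left carry loop with accumulator and its 36-entry tuple scan helper by a prefix/pivot/suffix construction: strip the trailing nines, bump the pivot character arithmetically on its character code (A-Y and 0-8 get code+1, Z wraps to 0, anything else to A), and pad with one A per stripped nine.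
import Mathlib
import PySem

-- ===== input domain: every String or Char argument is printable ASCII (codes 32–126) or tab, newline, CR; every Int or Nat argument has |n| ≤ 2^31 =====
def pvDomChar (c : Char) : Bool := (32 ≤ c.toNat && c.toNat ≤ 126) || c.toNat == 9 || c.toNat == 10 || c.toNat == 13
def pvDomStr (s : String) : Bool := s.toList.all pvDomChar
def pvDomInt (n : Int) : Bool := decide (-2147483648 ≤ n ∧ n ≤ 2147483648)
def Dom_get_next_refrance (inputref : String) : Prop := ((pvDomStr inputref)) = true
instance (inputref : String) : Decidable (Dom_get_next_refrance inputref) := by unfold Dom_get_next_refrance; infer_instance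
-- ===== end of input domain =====

-- B replaces A's right-to-left carry loop and its tuple-scan helper by an
-- rstrip/pivot/suffix construction with an arithmetic successor; objective: simpler.

-- ===== PORT A =====
-- the tuple of getnextchar, as a list of characters (1-char Python strings are Char lists of length 1)
def alphatuple : List Char :=
  ['A','B','C','D','E','F','G','H','I','J','K','L','M','N','O','P',
   'Q','R','S','T','U','V','W','X','Y','Z','0','1','2','3','4','5','6','7','8','9']

-- the 'for X in alphanumstrupple' loop with its 'location' counter; the index
-- alphanumstrupple[location] is in range whenever the branch is reached (the last
-- element '9' never matches, since onechar == '9' returned earlier), so getD is exact there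
def getnextchar_loop (xs : List Char) (location : Nat) (onechar : List Char) : List Char :=
  match xs with
  | [] => ['A']
  | X :: rest =>
      let location := location + 1
      if [X] = onechar then [alphatuple.getD location 'A']
      else getnextchar_loop rest location onechar

def getnextchar (onechar : List Char) : List Char :=
  if onechar = ['9'] then ['A'] else getnextchar_loop alphatuple 0 onechar

-- A's while loop, recursing on 'length'; inputref[length:length+1] = (take (length+1)).drop length,
-- inputref[0:length] = take length (exact Python slice semantics for 0 ≤ length ≤ len)
def get_next_refrance_loop (l : List Char) : Nat → List Char → List Char
  | 0, output => output
  | Nat.succ n, output =>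
      let currentchar := (l.take (n + 1)).drop n
      if currentchar = ['9'] then
        get_next_refrance_loop l n (output ++ getnextchar currentchar)
      else
        l.take n ++ getnextchar currentchar ++ output

def get_next_refrance (inputref : String) : String :=
  String.mk (get_next_refrance_loop inputref.toList inputref.toList.length [])

-- ===== PORT B =====
-- the arithmetic successor of Source B: A-Y and 0-8 get code+1, 'Z' wraps to '0', anything else to 'A'
def nextchar (c : Char) : Char :=
  if ('A' ≤ c ∧ c ≤ 'Y') ∨ ('0' ≤ c ∧ c ≤ '8') then Char.ofNat (c.toNat + 1)
  else if c = 'Z' then '0'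
  else 'A'

-- B: stripped = inputref.rstrip('9'); k = len(inputref) - len(stripped);
-- '' -> 'A'*k; else stripped[:-1] + nextchar(stripped[-1]) + 'A'*k.
-- rstrip('9') is reverse ∘ dropWhile (= '9') ∘ reverse; matching on the dropWhile result
-- gives stripped[-1] (the head) and stripped[:-1] (the reversed tail) directly.
def get_next_refrance_alt (inputref : String) : String :=
  let l := inputref.toList
  match l.reverse.dropWhile (fun c => c == '9') with
  | [] => String.mk (List.replicate l.length 'A')
  | c :: rest =>
      String.mk (rest.reverse ++ [nextchar c] ++
        List.replicate (l.length - (rest.length + 1)) 'A')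

-- ===== PRECONDITION & SPEC =====
def Spec_get_next_refrance (inputref : String) (out : String) : Prop := out = get_next_refrance_alt inputref
instance (inputref : String) (out : String) : Decidable (Spec_get_next_refrance inputref out) := by unfold Spec_get_next_refrance; infer_instance

-- ===== CLAIM (what is proved, stated in full; the proofs are below) =====
def Claim_equal_get_next_refrance : Prop := ∀ (inputref : String), Dom_get_next_refrance inputref → Spec_get_next_refrance inputref (get_next_refrance inputref)

-- ===== LEMMAS AND PROOFS =====

-- A's table-scan helper agrees with B's arithmetic successor on every ASCII char (code < 128)
theorem getnextchar_eq_nextchar_ofNat : ∀ n < 128,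
    getnextchar [Char.ofNat n] = [nextchar (Char.ofNat n)] := by decide

theorem getnextchar_eq_nextchar (c : Char) (h : pvDomChar c = true) :
    getnextchar [c] = [nextchar c] := by
  have hn : c.toNat < 128 := by
    simp [pvDomChar] at h
    omega
  have := getnextchar_eq_nextchar_ofNat c.toNat hn
  rwa [Char.ofNat_toNat] at this

-- the character A's loop reads at position n is l[n]
theorem currentchar_eq (l : List Char) (n : Nat) (h : n < l.length) :
    (l.take (n + 1)).drop n = [l[n]] := by
  rw [List.drop_take, show n + 1 - n = 1 by omega, List.drop_eq_getElem_cons h]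
  rfl

-- invariant of A's loop: on the first n characters it computes the rstrip/pivot/suffix value
theorem loop_spec (l : List Char) : ∀ (n : Nat), n ≤ l.length → ∀ (out : List Char),
    get_next_refrance_loop l n out =
      match (l.take n).reverse.dropWhile (fun c => c == '9') with
      | [] => out ++ List.replicate n 'A'
      | c :: rest => rest.reverse ++ getnextchar [c] ++ out ++
          List.replicate (n - (rest.length + 1)) 'A' := by
  intro n
  induction n with
  | zero =>
      intro _ out
      rw [show get_next_refrance_loop l 0 out = out from rfl]
      have h0 : (List.take 0 l).reverse.dropWhile (fun c => c == '9') = [] := by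
        rw [List.take_zero]; rfl
      rw [h0]
      dsimp only
      simp
  | succ m ih =>
      intro hle out
      have hm : m < l.length := by omega
      have htake : l.take (m + 1) = l.take m ++ [l[m]] := by
        rw [List.take_add_one]
        simp [List.getElem?_eq_getElem hm]
      by_cases h9 : l[m] = '9'
      · have hA : getnextchar ['9'] = ['A'] := rfl
        have hstep : get_next_refrance_loop l (m + 1) out
            = get_next_refrance_loop l m (out ++ ['A']) := by
          simp only [get_next_refrance_loop, currentchar_eq l m hm, h9, hA]
          simp
        rw [hstep, ih (by omega) (out ++ ['A'])]
        have hrev : (l.take (m + 1)).reverse.dropWhile (fun c => c == '9')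
            = (l.take m).reverse.dropWhile (fun c => c == '9') := by
          rw [htake, List.reverse_append]
          simp [h9]
        rw [hrev]
        cases hcase : (l.take m).reverse.dropWhile (fun c => c == '9') with
        | nil =>
            dsimp only
            simp [List.replicate_succ]
        | cons c rest =>
            have hsub := List.dropWhile_sublist (l := (l.take m).reverse)
              (p := fun c => c == '9')
            rw [hcase] at hsub
            have h1 : (c :: rest).length ≤ ((l.take m).reverse).length :=
              hsub.length_le
            have h2 : ((l.take m).reverse).length = m := by
              simp [List.length_take, Nat.min_eq_left (le_of_lt hm)]
            have hlen : rest.length + 1 ≤ m := by simp at h1; omega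
            dsimp only
            rw [show m + 1 - (rest.length + 1) = (m - (rest.length + 1)) + 1 by omega,
              List.replicate_succ]
            simp
      · have hstop : (l.take (m + 1)).reverse.dropWhile (fun c => c == '9')
            = l[m] :: (l.take m).reverse := by
          rw [htake, List.reverse_append]
          simp [h9]
        have hstep : get_next_refrance_loop l (m + 1) out
            = l.take m ++ (getnextchar [l[m]] ++ out) := by
          simp only [get_next_refrance_loop, currentchar_eq l m hm]
          rw [if_neg (by simp [h9]), List.append_assoc]
        rw [hstep, hstop]
        simp [List.length_take, Nat.min_eq_left (le_of_lt hm)]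

-- ===== VERDICT (by name: the statement is the Claim_ definition above) =====
theorem get_next_refrance_spec : Claim_equal_get_next_refrance := by
  intro s hdom
  unfold Spec_get_next_refrance get_next_refrance get_next_refrance_alt
  rw [loop_spec s.toList s.toList.length (le_refl _) []]
  simp only [List.take_length]
  cases hcase : s.toList.reverse.dropWhile (fun c => c == '9') with
  | nil => simp
  | cons c rest =>
      have hmem : c ∈ s.toList := by
        have hsub := List.dropWhile_sublist (l := s.toList.reverse)
          (p := fun c => c == '9')
        rw [hcase] at hsub
        exact List.mem_reverse.mp (hsub.mem (List.mem_cons_self ..))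
      have hc : pvDomChar c = true := by
        have := hdom
        unfold Dom_get_next_refrance pvDomStr at this
        exact List.all_eq_true.mp this c hmem
      dsimp only
      rw [getnextchar_eq_nextchar c hc]
      simp
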